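-- pv_equiv track=rewrite | github.com/superjump99/2023IMA | function.py | candidateVolume
-- ===== SOURCE A (Python) =====
-- def candidateVolume(order_volume):
--     count = {}
--     candi_volume = []
--     for i in order_volume.values():
--         try:
--             count[i] += 1
--         except:
--             count[i] = 1
--         finally:
--             if i not in candi_volume:
--                 candi_volume.append(i)
--     count = (sorted(count.items(), key=lambda x: x[1], reverse=True))
--
--     return count, candi_volume
-- ===== SOURCE B (Python) =====
-- def candidateVolume(order_volume):
--     vals = list(order_volume.values())
--     candi_volume = list(dict.fromkeys(vals))
--     pairs = [(v, vals.count(v)) for v in candi_volume]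
--     count = [p for c in range(len(vals), 0, -1) for p in pairs if p[1] == c]
--     return count, candi_volume
-- ===== Notes on version B (the rewrite author's own statement) =====
-- stated objective: alternative
-- what changed: B drops both A's in-loop counter dict and the comparison sort: it dedupes the values once (dict.fromkeys), counts each unique value with list.count, and produces the count-descending item list by a bucket sweep over counts from len(vals) down to 1, whose scan order over the uniques reproduces the stable sort's first-appearance tie order.
import Mathlib
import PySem

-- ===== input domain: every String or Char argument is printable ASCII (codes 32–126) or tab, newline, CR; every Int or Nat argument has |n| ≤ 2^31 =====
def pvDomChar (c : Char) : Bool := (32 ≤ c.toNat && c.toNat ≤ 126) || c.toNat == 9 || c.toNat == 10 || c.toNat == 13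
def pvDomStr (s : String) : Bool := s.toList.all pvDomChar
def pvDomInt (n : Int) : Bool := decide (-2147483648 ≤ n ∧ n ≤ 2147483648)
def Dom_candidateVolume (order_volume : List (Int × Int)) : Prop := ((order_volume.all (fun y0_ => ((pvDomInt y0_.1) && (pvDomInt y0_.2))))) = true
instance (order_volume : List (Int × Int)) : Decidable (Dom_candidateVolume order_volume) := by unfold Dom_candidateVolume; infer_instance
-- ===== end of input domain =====

-- B replaces A's counter-dict-plus-membership-list loop and its comparison sort by a
-- dedup + per-value count + bucket sweep over counts from high to low (no sorted() call);
-- same return value, proved equal.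

-- ===== PORT A =====
-- A: one loop over the dict's values maintaining a counter dict AND a separate
-- first-appearance list guarded by a membership test; then sort items by count, descending.
def candidateVolume (order_volume : List (Int × Int)) : (List (Int × Int)) × List Int :=
  let vals := (PySem.Dict.ofList order_volume).values
  let st := vals.foldl
    (fun (st : PySem.Dict Int Int × List Int) i =>
      (st.1.modify i 0 (· + 1),                        -- try: count[i] += 1  except: count[i] = 1
       if st.2.contains i then st.2 else st.2 ++ [i])) -- if i not in candi_volume: append
    (PySem.Dict.empty, [])
  (PySem.List.sorted st.1.items (fun x => x.2) true, st.2)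

-- ===== PORT B =====
-- B: candi_volume = list(dict.fromkeys(vals)); pairs = [(v, vals.count(v)) for v in candi_volume];
-- then the sorted item list is produced by a bucket sweep c = len(vals) .. 1 collecting pairs with count c.
def candidateVolume_alt (order_volume : List (Int × Int)) : (List (Int × Int)) × List Int :=
  let vals := (PySem.Dict.ofList order_volume).values
  let candi_volume := PySem.List.dedup vals
  let pairs := candi_volume.map (fun v => (v, (vals.count v : Int)))
  let count := (PySem.List.pyRange (vals.length : Int) 0 (-1)).foldl
      (fun acc c => acc ++ pairs.filter (fun p => p.2 == c)) []
  (count, candi_volume)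

-- ===== PRECONDITION & SPEC =====
def Spec_candidateVolume (order_volume : List (Int × Int)) (out : (List (Int × Int)) × List Int) : Prop := out = candidateVolume_alt order_volume
instance (order_volume : List (Int × Int)) (out : (List (Int × Int)) × List Int) : Decidable (Spec_candidateVolume order_volume out) := by unfold Spec_candidateVolume; infer_instance

-- ===== CLAIM (what is proved, stated in full; the proofs are below) =====
def Claim_equal_candidateVolume : Prop := ∀ (order_volume : List (Int × Int)), Dom_candidateVolume order_volume → Spec_candidateVolume order_volume (candidateVolume order_volume)

-- ===== LEMMAS AND PROOFS =====

-- A's candi_volume loop is exactly building a PySem.Set from the values.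
lemma candi_loop_eq_ofList (l : List Int) :
    l.foldl (fun (s : List Int) i => if s.contains i then s else s ++ [i]) [] =
      PySem.Set.ofList l := by
  rw [PySem.Set.ofList_eq_foldl]
  rfl

-- inserting past a prefix no element of which goes after x
lemma insertBy_append_of_forall_not (before : (Int × Int) → (Int × Int) → Bool)
    (x : Int × Int) (ys zs : List (Int × Int)) (h : ∀ y ∈ ys, before x y = false) :
    PySem.List.insertBy before x (ys ++ zs) = ys ++ PySem.List.insertBy before x zs := by
  induction ys with
  | nil => rfl
  | cons y ys ih =>
      simp only [List.cons_append, PySem.List.insertBy]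
      rw [h y (by simp)]
      simp [ih (fun y hy => h y (by simp [hy]))]

-- x goes in front when every element of the list goes after it
lemma insertBy_eq_cons_of_forall (before : (Int × Int) → (Int × Int) → Bool)
    (x : Int × Int) (zs : List (Int × Int)) (h : ∀ z ∈ zs, before x z = true) :
    PySem.List.insertBy before x zs = x :: zs := by
  cases zs with
  | nil => rfl
  | cons z zs => simp [PySem.List.insertBy, h z (by simp)]

-- a countdown range splits at any point inside it
lemma pyRange_neg_one_split (n k : Int) (h1 : 0 ≤ k) (h2 : k ≤ n) :
    PySem.List.pyRange n 0 (-1) =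
      PySem.List.pyRange n k (-1) ++ PySem.List.pyRange k 0 (-1) := by
  rw [PySem.List.pyRange_neg_one_eq_reverse, PySem.List.pyRange_neg_one_eq_reverse n k,
      PySem.List.pyRange_neg_one_eq_reverse k 0,
      PySem.List.pyRange_one_append (0+1) (k+1) (n+1) (by omega) (by omega),
      List.reverse_append]

-- stable descending sort on integer keys in [1, n] is the bucket sweep n, n-1, …, 1
lemma sorted_rev_eq_buckets (ps : List (Int × Int)) (n : Int)
    (h : ∀ p ∈ ps, 1 ≤ p.2 ∧ p.2 ≤ n) :
    PySem.List.sorted ps (fun p => p.2) true =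
      (PySem.List.pyRange n 0 (-1)).flatMap (fun c => ps.filter (fun p => p.2 == c)) := by
  induction ps using List.reverseRecOn with
  | nil => simp [PySem.List.sorted]
  | append_singleton ps x ih =>
      have hx := h x (by simp)
      have hps : ∀ p ∈ ps, 1 ≤ p.2 ∧ p.2 ≤ n := fun p hp => h p (by simp [hp])
      rw [PySem.List.sorted_rev_eq_foldl_insertBy, List.foldl_append,
          ← PySem.List.sorted_rev_eq_foldl_insertBy, ih hps]
      simp only [List.foldl_cons, List.foldl_nil]
      -- split the range at the key of x
      rw [pyRange_neg_one_split n x.2 (by omega) hx.2,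
          PySem.List.pyRange_neg_one_cons (a := x.2) (b := 0) hx.1]
      simp only [List.flatMap_append, List.flatMap_cons]
      rw [insertBy_append_of_forall_not _ x _ _ (by
        intro y hy
        simp only [List.mem_flatMap, List.mem_filter, beq_iff_eq] at hy
        obtain ⟨c, hc, _, hyc⟩ := hy
        rw [PySem.List.mem_pyRange_neg_one] at hc
        simp [hyc]; omega)]
      rw [insertBy_append_of_forall_not _ x _ _ (by
        intro y hy
        simp only [List.mem_filter, beq_iff_eq] at hy
        simp [hy.2])]
      rw [insertBy_eq_cons_of_forall _ x _ (by
        intro z hz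
        simp only [List.mem_flatMap, List.mem_filter, beq_iff_eq] at hz
        obtain ⟨c, hc, _, hzc⟩ := hz
        rw [PySem.List.mem_pyRange_neg_one] at hc
        simp [hzc]; omega)]
      have hhi : List.flatMap (fun c => List.filter (fun p => p.2 == c) (ps ++ [x]))
            (PySem.List.pyRange n x.2 (-1))
          = List.flatMap (fun c => List.filter (fun p => p.2 == c) ps)
            (PySem.List.pyRange n x.2 (-1)) := by
        refine List.flatMap_congr (fun c hc => ?_)
        rw [PySem.List.mem_pyRange_neg_one] at hc
        have hne : (x.2 == c) = false := by simp; omega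
        simp [List.filter_append, hne]
      have hlo : List.flatMap (fun c => List.filter (fun p => p.2 == c) (ps ++ [x]))
            (PySem.List.pyRange (x.2 - 1) 0 (-1))
          = List.flatMap (fun c => List.filter (fun p => p.2 == c) ps)
            (PySem.List.pyRange (x.2 - 1) 0 (-1)) := by
        refine List.flatMap_congr (fun c hc => ?_)
        rw [PySem.List.mem_pyRange_neg_one] at hc
        have hne : (x.2 == c) = false := by simp; omega
        simp [List.filter_append, hne]
      have hmid : List.filter (fun p => p.2 == x.2) (ps ++ [x])
          = List.filter (fun p => p.2 == x.2) ps ++ [x] := by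
        simp [List.filter_append]
      rw [hhi, hlo, hmid]
      simp

-- ===== VERDICT (by name: the statement is the Claim_ definition above) =====
theorem candidateVolume_spec : Claim_equal_candidateVolume := by
  intro ov _
  unfold Spec_candidateVolume candidateVolume candidateVolume_alt
  dsimp only
  rw [PySem.List.foldl_prod_mk
      (f := fun (c : PySem.Dict Int Int) i => c.modify i 0 (· + 1))
      (g := fun (s : List Int) i => if s.contains i then s else s ++ [i])]
  rw [candi_loop_eq_ofList, ← PySem.Dict.counter_eq_foldl, PySem.Dict.items_counter]
  simp only [PySem.List.dedup_eq_ofList]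
  rw [PySem.List.foldl_append_eq_flatMap]
  refine Prod.ext ?_ rfl
  refine sorted_rev_eq_buckets _ _ ?_
  intro p hp
  simp only [List.mem_map] at hp
  obtain ⟨k, hk, rfl⟩ := hp
  rw [PySem.Set.mem_ofList] at hk
  have h1 : 0 < List.count k (PySem.Dict.ofList ov).values := List.count_pos_iff.mpr hk
  have h2 : List.count k (PySem.Dict.ofList ov).values ≤ (PySem.Dict.ofList ov).values.length :=
    List.count_le_length
  constructor <;> simp <;> omega
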